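-- pv_equiv track=rewrite | github.com/sinwoongkang1/codingtestWithPython | BEAKJOON_2108.py | moreAppearance
-- ===== SOURCE A (Python) =====
-- def moreAppearance(stack):
--     map = {}
--     for i in stack:
--         if i not in map:
--             map[i] = 1
--         else:
--             map[i] += 1
--     sorted_map = dict(sorted(map.items(), key=lambda item: item[1]))
--     max = 0
--     answer = []
--     for i in sorted_map:
--         sorted_map[i] >= max
--         max = sorted_map[i]
--     for i in sorted_map:
--         if max == sorted_map[i]:
--             answer.append(i)
--     if len(answer) == 1:
--         return answer[0]
--     else:
--         return answer[1]
-- ===== SOURCE B (Python) =====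
-- def moreAppearance(stack):
--     seen = set()
--     best = 0
--     modes = []
--     for v in stack:
--         if v in seen:
--             continue
--         seen.add(v)
--         c = stack.count(v)
--         if c > best:
--             best = c
--             modes = [v]
--         elif c == best:
--             modes.append(v)
--     return modes[0] if len(modes) == 1 else modes[1]
-- ===== Notes on version B (the rewrite author's own statement) =====
-- stated objective: simpler
-- what changed: Replaces the count-dict + stable sort-by-frequency + dict-rebuild + two key loops with a single seen-set scan that rescans with stack.count at each first occurrence, maintaining the running maximum frequency and the list of modes directly.
import Mathlib
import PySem

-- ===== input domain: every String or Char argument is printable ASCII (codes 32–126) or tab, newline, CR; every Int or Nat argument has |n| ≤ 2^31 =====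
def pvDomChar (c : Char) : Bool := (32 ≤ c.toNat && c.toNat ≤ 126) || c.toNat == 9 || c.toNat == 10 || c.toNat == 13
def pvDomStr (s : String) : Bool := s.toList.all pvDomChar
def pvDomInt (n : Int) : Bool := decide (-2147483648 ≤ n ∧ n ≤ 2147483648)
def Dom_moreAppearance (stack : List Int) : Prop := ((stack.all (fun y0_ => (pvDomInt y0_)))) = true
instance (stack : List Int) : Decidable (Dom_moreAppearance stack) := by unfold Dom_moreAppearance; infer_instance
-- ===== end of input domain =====

-- B replaces A's count-dict / stable sort by frequency / rebuilt dict / two key loops with one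
-- seen-set scan that rescans with stack.count, tracking the max frequency and the modes directly.

-- ===== PORT A =====
-- the `.getD 0` on pyGet? marks exactly where Python raises IndexError (empty `answer`,
-- i.e. empty `stack`); those inputs are outside Pre_moreAppearance
def moreAppearance (stack : List Int) : Int :=
  let map : PySem.Dict Int Int := stack.foldl
    (fun m i => if m.contains i = false then m.insert i 1 else m.insert i (m.getD i 0 + 1))
    PySem.Dict.empty
  let sortedItems := PySem.List.sorted map.items (fun item => item.2)
  let sortedMap := PySem.Dict.ofList sortedItems
  let mx : Int := sortedMap.keys.foldl (fun _ i => sortedMap.getD i 0) 0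
  let answer : List Int :=
    sortedMap.keys.foldl (fun acc i => if mx = sortedMap.getD i 0 then acc ++ [i] else acc) []
  if answer.length = 1 then (PySem.List.pyGet? answer 0).getD 0
  else (PySem.List.pyGet? answer 1).getD 0

-- ===== PORT B =====
def moreAppearance_alt (stack : List Int) : Int :=
  let st := stack.foldl
    (fun (s : PySem.Set Int × Int × List Int) v =>
      if PySem.Set.contains s.1 v then s
      else
        let c : Int := (PySem.List.count stack v : Int)
        if c > s.2.1 then (PySem.Set.add s.1 v, c, [v])
        else if c = s.2.1 then (PySem.Set.add s.1 v, s.2.1, s.2.2 ++ [v])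
        else (PySem.Set.add s.1 v, s.2.1, s.2.2))
    (PySem.Set.empty, 0, [])
  let modes := st.2.2
  if modes.length = 1 then (PySem.List.pyGet? modes 0).getD 0
  else (PySem.List.pyGet? modes 1).getD 0

-- ===== PRECONDITION & SPEC =====
-- Pre_ excludes only the empty list, on which A (and B) raise IndexError
def Pre_moreAppearance (stack : List Int) : Prop := stack ≠ []
instance (stack : List Int) : Decidable (Pre_moreAppearance stack) := by
  unfold Pre_moreAppearance; infer_instance
def pvWitness_moreAppearance : List Int := [1, 2, 2]
def Spec_moreAppearance (stack : List Int) (out : Int) : Prop := out = moreAppearance_alt stack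
instance (stack : List Int) (out : Int) : Decidable (Spec_moreAppearance stack out) := by
  unfold Spec_moreAppearance; infer_instance

-- ===== CLAIM (what is proved, stated in full; the proofs are below) =====
def Claim_equal_moreAppearance : Prop := ∀ (stack : List Int), Dom_moreAppearance stack → Pre_moreAppearance stack → Spec_moreAppearance stack (moreAppearance stack)

-- ===== LEMMAS AND PROOFS =====

-- canonical values both ports are reduced to (proof-only helpers)
def pvKs (stack : List Int) : List Int := PySem.Set.ofList stack
def pvCnt (stack : List Int) (k : Int) : Int := (List.count k stack : Int)
def pvOut (ans : List Int) : Int :=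
  if ans.length = 1 then (PySem.List.pyGet? ans 0).getD 0 else (PySem.List.pyGet? ans 1).getD 0
def pvG (stack : List Int) (bm : Int × List Int) (k : Int) : Int × List Int :=
  if pvCnt stack k > bm.1 then (pvCnt stack k, [k])
  else if pvCnt stack k = bm.1 then (bm.1, bm.2 ++ [k])
  else bm

lemma map_eq_counter (stack : List Int) :
    stack.foldl (fun m i => if m.contains i = false then m.insert i 1 else m.insert i (m.getD i 0 + 1))
      PySem.Dict.empty = PySem.Dict.counter stack := by
  rw [PySem.Dict.counter_eq_foldl]
  congr 1
  funext m i
  by_cases h : m.contains i = true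
  · simp [h, PySem.Dict.modify]
  · simp only [Bool.not_eq_true] at h
    simp [h, PySem.Dict.modify, PySem.Dict.getD_of_not_contains m 0 h]

lemma foldl_const_fun {α β : Type} (f : α → β) (l : List α) (a : β) :
    l.foldl (fun _ x => f x) a = (l.map f).getLastD a := by
  induction l generalizing a with
  | nil => rfl
  | cons x xs ih => rw [List.foldl_cons, ih (f x), List.map_cons, List.getLastD_cons]

lemma getLastD_mem {α : Type} (l : List α) (a : α) (h : l ≠ []) : l.getLastD a ∈ l := by
  induction l generalizing a with
  | nil => exact absurd rfl h
  | cons x xs ih =>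
    rw [List.getLastD_cons]
    rcases eq_or_ne xs [] with rfl | h'
    · simp
    · exact List.mem_cons_of_mem _ (ih x h')

lemma pairwise_le_getLastD (l : List Int) (a : Int) (hp : l.Pairwise (· ≤ ·)) :
    ∀ x ∈ l, x ≤ l.getLastD a := by
  induction l generalizing a with
  | nil => intro x hx; simp at hx
  | cons y ys ih =>
    intro x hx
    rw [List.getLastD_cons]
    rcases List.mem_cons.1 hx with rfl | hx'
    · rcases eq_or_ne ys [] with rfl | h'
      · simp
      · exact List.rel_of_pairwise_cons hp (getLastD_mem ys x h')
    · exact ih y hp.of_cons x hx'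

lemma filter_insertBy_of_neg {α : Type} (p : α → Bool) (before : α → α → Bool) (x : α)
    (l : List α) (hx : p x = false) :
    (PySem.List.insertBy before x l).filter p = l.filter p := by
  induction l with
  | nil => simp [PySem.List.insertBy, hx]
  | cons y ys ih =>
    rw [PySem.List.insertBy]
    by_cases h : before x y = true
    · simp [h, hx]
    · simp only [h] at *
      simp [List.filter_cons, ih]

lemma filter_max_foldl_insertBy (M : Int) (l : List (Int × Int)) :
    ∀ acc : List (Int × Int), (∀ q ∈ acc, q.2 ≤ M) → (∀ q ∈ l, q.2 ≤ M) →
    (l.foldl (fun acc x => PySem.List.insertBy (fun a b => decide (a.2 < b.2)) x acc) acc).filter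
        (fun q => decide (M = q.2)) =
      acc.filter (fun q => decide (M = q.2)) ++ l.filter (fun q => decide (M = q.2)) := by
  induction l with
  | nil => intro acc _ _; simp
  | cons x xs ih =>
    intro acc hacc hl
    rw [List.foldl_cons]
    have hacc' : ∀ q ∈ PySem.List.insertBy (fun a b => decide (a.2 < b.2)) x acc, q.2 ≤ M := by
      intro q hq
      rcases (PySem.List.insertBy_mem_iff _ _ _ _).1 hq with rfl | hq'
      · exact hl _ (List.mem_cons_self ..)
      · exact hacc q hq'
    rw [ih _ hacc' (fun q hq => hl q (List.mem_cons_of_mem _ hq))]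
    by_cases hx : M = x.2
    · have : PySem.List.insertBy (fun a b => decide (a.2 < b.2)) x acc = acc ++ [x] := by
        apply PySem.List.insertBy_of_forall_not_before
        intro y hy
        simp only [decide_eq_false_iff_not, not_lt]
        exact hx ▸ hacc y hy
      rw [this, List.filter_append, List.filter_cons]
      simp [hx]
    · rw [filter_insertBy_of_neg _ _ _ _ (by simp [hx]), List.filter_cons]
      simp [hx]

lemma A_char (stack : List Int) :
    ∃ M : Int, (∀ k ∈ pvKs stack, pvCnt stack k ≤ M) ∧
      (stack ≠ [] → ∃ k ∈ pvKs stack, pvCnt stack k = M) ∧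
      moreAppearance stack = pvOut ((pvKs stack).filter (fun k => decide (M = pvCnt stack k))) := by
  -- the items of the counter dict
  have hitems : (PySem.Dict.counter stack).items
      = (pvKs stack).map (fun k => (k, pvCnt stack k)) := by
    rw [PySem.Dict.items_counter]; rfl
  set items := (pvKs stack).map (fun k => (k, pvCnt stack k)) with hitemsdef
  set sortedItems := PySem.List.sorted items (fun item => item.2) with hsorted
  -- nodup of first components of sortedItems
  have hperm : sortedItems.Perm items := PySem.List.sorted_perm items _ _
  have hnodupItems : (items.map Prod.fst).Nodup := by
    have := PySem.Dict.nodup_keys_counter (κ := Int) stack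
    unfold PySem.Dict.keys at this
    rw [hitems] at this
    simpa using this
  have hnodup : (sortedItems.map Prod.fst).Nodup :=
    ((hperm.map Prod.fst).nodup_iff).2 hnodupItems
  -- the rebuilt dict has exactly the sorted items
  have hofl : (PySem.Dict.ofList sortedItems).items = sortedItems := by
    unfold PySem.Dict.ofList PySem.Dict.update
    rw [PySem.Dict.items_foldl_insert_fresh sortedItems Prod.fst Prod.snd PySem.Dict.empty
      (by intro a _; rfl) hnodup]
    simp [PySem.Dict.empty]
  have hkeys : (PySem.Dict.ofList sortedItems).keys = sortedItems.map Prod.fst := by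
    unfold PySem.Dict.keys; rw [hofl]
  have hgetD : ∀ q ∈ sortedItems, (PySem.Dict.ofList sortedItems).getD q.1 0 = q.2 := by
    intro q hq
    exact PySem.Dict.getD_of_mem_items _ (by rw [hofl]; simpa using hq)
      (PySem.Dict.nodup_keys_ofList _) 0
  set d := PySem.Dict.ofList sortedItems with hd
  have hmapkeys : (d.keys).map (fun i => d.getD i 0) = sortedItems.map (fun q => q.2) := by
    rw [hkeys, List.map_map]
    refine List.map_congr_left (fun q hq => hgetD q hq)
  set mx := d.keys.foldl (fun _ i => d.getD i 0) 0 with hmxdef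
  have hmx2 : mx = (sortedItems.map (fun q => q.2)).getLastD 0 := by
    rw [hmxdef, foldl_const_fun, hmapkeys]
  have hub : ∀ q ∈ sortedItems, q.2 ≤ mx := by
    intro q hq
    rw [hmx2]
    exact pairwise_le_getLastD _ 0 (PySem.List.sorted_map_key_pairwise items _) q.2
      (List.mem_map_of_mem hq)
  have hubI : ∀ q ∈ items, q.2 ≤ mx := fun q hq => hub q (hperm.mem_iff.2 hq)
  have hubK : ∀ k ∈ pvKs stack, pvCnt stack k ≤ mx := by
    intro k hk
    exact hubI (k, pvCnt stack k) (List.mem_map_of_mem hk)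
  have hmem : stack ≠ [] → ∃ k ∈ pvKs stack, pvCnt stack k = mx := by
    intro hne
    have hksne : pvKs stack ≠ [] := by
      rcases List.exists_mem_of_ne_nil stack hne with ⟨x, hx⟩
      have : x ∈ pvKs stack := (PySem.Set.mem_ofList stack x).2 hx
      exact List.ne_nil_of_mem this
    have hsne : sortedItems.map (fun q => q.2) ≠ [] := by
      have hine : items ≠ [] := by
        rw [hitemsdef]
        simpa using hksne
      simp only [ne_eq, List.map_eq_nil_iff]
      intro hnil
      apply hine
      have hlen := hperm.length_eq
      rw [hnil] at hlen
      exact List.eq_nil_of_length_eq_zero hlen.symm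
    have := getLastD_mem _ 0 hsne
    rw [← hmx2] at this
    rcases List.mem_map.1 this with ⟨q, hq, hq2⟩
    rcases List.mem_map.1 (hperm.mem_iff.1 hq) with ⟨k, hk, rfl⟩
    exact ⟨k, hk, hq2⟩
  refine ⟨mx, hubK, hmem, ?_⟩
  -- now compute moreAppearance
  simp only [moreAppearance]
  rw [map_eq_counter, hitems]
  rw [← hsorted, ← hd, ← hmxdef]
  have hfold : (d.keys).foldl (fun acc i => if mx = d.getD i 0 then acc ++ [i] else acc) [] =
      (d.keys.filter (fun i => decide (mx = d.getD i 0))).map (fun i => (i : Int)) := by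
    have h := PySem.List.foldl_append_if (fun i => decide (mx = d.getD i 0))
      (fun i => (i : Int)) d.keys []
    simpa using h
  rw [hfold]
  have hfilter : (d.keys.filter (fun i => decide (mx = d.getD i 0))).map (fun i => (i : Int)) =
      (pvKs stack).filter (fun k => decide (mx = pvCnt stack k)) := by
    rw [List.map_id'', hkeys, List.filter_map]
    have hcongr : List.filter ((fun i => decide (mx = d.getD i 0)) ∘ Prod.fst) sortedItems =
        List.filter (fun q => decide (mx = q.2)) sortedItems := by
      refine List.filter_congr ?_
      intro q hq
      simp only [Function.comp_apply]
      rw [hgetD q hq]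
    rw [hcongr]
    have hstab : List.filter (fun q => decide (mx = q.2)) sortedItems =
        List.filter (fun q => decide (mx = q.2)) items := by
      rw [hsorted, PySem.List.sorted_eq_foldl_insertBy]
      simpa using filter_max_foldl_insertBy mx items [] (by intro q hq; simp at hq) hubI
    rw [hstab, hitemsdef, List.filter_map, List.map_map]
    have : List.filter ((fun q => decide (mx = q.2)) ∘ (fun k => (k, pvCnt stack k))) (pvKs stack) =
        List.filter (fun k => decide (mx = pvCnt stack k)) (pvKs stack) := by
      refine List.filter_congr ?_
      intro k _
      rfl
    rw [this]
    have hid : (Prod.fst ∘ fun k => (k, pvCnt stack k)) = id := rfl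
    rw [hid, List.map_id]
    exact fun _ => rfl
  rw [hfilter]
  rfl

lemma B_fold (stack : List Int) (l : List Int) :
    l.foldl
      (fun (s : PySem.Set Int × Int × List Int) v =>
        if PySem.Set.contains s.1 v then s
        else
          let c : Int := (PySem.List.count stack v : Int)
          if c > s.2.1 then (PySem.Set.add s.1 v, c, [v])
          else if c = s.2.1 then (PySem.Set.add s.1 v, s.2.1, s.2.2 ++ [v])
          else (PySem.Set.add s.1 v, s.2.1, s.2.2))
      (PySem.Set.empty, 0, []) =
    (PySem.Set.ofList l, (PySem.Set.ofList l).foldl (pvG stack) (0, [])) := by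
  induction l using List.reverseRecOn with
  | nil => rfl
  | append_singleton l v ih =>
    rw [List.foldl_append, ih]
    have hofl : PySem.Set.ofList (l ++ [v]) = PySem.Set.add (PySem.Set.ofList l) v := by
      unfold PySem.Set.ofList
      rw [List.foldl_append]
      rfl
    by_cases hm : PySem.Set.contains (PySem.Set.ofList l) v = true
    · simp only [List.foldl_cons, List.foldl_nil, hm, if_true]
      rw [hofl]
      unfold PySem.Set.add
      rw [if_pos hm]
    · simp only [List.foldl_cons, List.foldl_nil, Bool.not_eq_true] at hm ⊢
      rw [hm]
      simp only [Bool.false_eq_true, if_false]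
      rw [hofl]
      unfold PySem.Set.add
      rw [hm]
      simp only [Bool.false_eq_true, if_false]
      rw [List.foldl_append, List.foldl_cons, List.foldl_nil]
      unfold pvG pvCnt
      rw [PySem.List.count_eq]
      split_ifs <;> rfl

lemma G_invariant (stack : List Int) (l : List Int) :
    (∀ x ∈ l, pvCnt stack x ≤ (l.foldl (pvG stack) (0, [])).1) ∧
    (l.foldl (pvG stack) (0, [])).2
      = l.filter (fun k => decide ((l.foldl (pvG stack) (0, [])).1 = pvCnt stack k)) ∧
    ((l.foldl (pvG stack) (0, [])).1 = 0 ∨ ∃ x ∈ l, pvCnt stack x = (l.foldl (pvG stack) (0, [])).1) := by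
  induction l using List.reverseRecOn with
  | nil => exact ⟨by simp, rfl, Or.inl rfl⟩
  | append_singleton l x ih =>
    obtain ⟨ub, hm, hattain⟩ := ih
    rw [List.foldl_append, List.foldl_cons, List.foldl_nil]
    set r := l.foldl (pvG stack) (0, []) with hr
    by_cases h1 : pvCnt stack x > r.1
    · have hg : pvG stack r x = (pvCnt stack x, [x]) := by rw [pvG, if_pos h1]
      rw [hg]
      refine ⟨?_, ?_, Or.inr ⟨x, by simp, rfl⟩⟩
      · intro y hy
        rcases List.mem_append.1 hy with hy' | hy'
        · exact le_of_lt (lt_of_le_of_lt (ub y hy') h1)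
        · simp at hy'; subst hy'; rfl
      · rw [List.filter_append]
        have hnil : l.filter (fun k => decide ((pvCnt stack x, [x]).1 = pvCnt stack k)) = [] := by
          rw [List.filter_eq_nil_iff]
          intro k hk
          simp only [decide_eq_true_eq]
          exact fun he => absurd h1 (by rw [he]; exact not_lt.2 (ub k hk))
        rw [hnil]
        simp
    · by_cases h2 : pvCnt stack x = r.1
      · have hg : pvG stack r x = (r.1, r.2 ++ [x]) := by rw [pvG, if_neg h1, if_pos h2]
        rw [hg]
        refine ⟨?_, ?_, Or.inr ⟨x, by simp, h2⟩⟩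
        · intro y hy
          rcases List.mem_append.1 hy with hy' | hy'
          · exact ub y hy'
          · simp at hy'; subst hy'; exact le_of_eq h2
        · rw [List.filter_append, ← hm]
          simp [h2]
      · have hg : pvG stack r x = r := by rw [pvG, if_neg h1, if_neg h2]
        rw [hg]
        refine ⟨?_, ?_, ?_⟩
        · intro y hy
          rcases List.mem_append.1 hy with hy' | hy'
          · exact ub y hy'
          · simp at hy'; subst hy'; exact le_of_not_gt h1
        · rw [List.filter_append, ← hm]
          have : decide (r.1 = pvCnt stack x) = false := by
            simp only [decide_eq_false_iff_not]
            exact fun he => h2 he.symm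
          simp [this]
        · rcases hattain with h | ⟨y, hy, hcy⟩
          · exact Or.inl h
          · exact Or.inr ⟨y, List.mem_append_left _ hy, hcy⟩

lemma B_char (stack : List Int) :
    (∀ k ∈ pvKs stack, pvCnt stack k ≤ ((pvKs stack).foldl (pvG stack) (0, [])).1) ∧
    (((pvKs stack).foldl (pvG stack) (0, [])).1 = 0 ∨
      ∃ k ∈ pvKs stack, pvCnt stack k = ((pvKs stack).foldl (pvG stack) (0, [])).1) ∧
    moreAppearance_alt stack = pvOut ((pvKs stack).filter
      (fun k => decide (((pvKs stack).foldl (pvG stack) (0, [])).1 = pvCnt stack k))) := by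
  obtain ⟨ub, hm, hattain⟩ := G_invariant stack (pvKs stack)
  refine ⟨ub, hattain, ?_⟩
  simp only [moreAppearance_alt]
  rw [B_fold stack stack, pvOut]
  rw [show (PySem.Set.ofList stack) = pvKs stack from rfl] at *
  rw [hm]


-- ===== VERDICT (by name: the statement is the Claim_ definition above) =====
theorem moreAppearance_spec : Claim_equal_moreAppearance := by
  intro stack _ hpre
  unfold Spec_moreAppearance
  obtain ⟨M, ubA, memA, eA⟩ := A_char stack
  obtain ⟨ubB, attB, eB⟩ := B_char stack
  have hMeq : M = ((pvKs stack).foldl (pvG stack) (0, [])).1 := by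
    obtain ⟨k0, hk0, hck0⟩ := memA hpre
    have h1 : M ≤ ((pvKs stack).foldl (pvG stack) (0, [])).1 := hck0 ▸ ubB k0 hk0
    have h2 : ((pvKs stack).foldl (pvG stack) (0, [])).1 ≤ M := by
      rcases attB with h0 | ⟨k1, hk1, hck1⟩
      · rw [h0, ← hck0]
        exact Int.natCast_nonneg _
      · exact hck1 ▸ ubA k1 hk1
    exact le_antisymm h1 h2
  rw [eA, eB, hMeq]
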